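-- pv_equiv track=rewrite | github.com/cheshyre/advent-of-code | 2021/05/part2.py | expand_diagonal_line
-- ===== SOURCE A (Python) =====
-- from typing import List, Tuple
--
-- def expand_diagonal_line(
--     ep1: Tuple[int, int], ep2: Tuple[int, int]
-- ) -> List[Tuple[int, int]]:
--     # Guaranteed to be integer so we can use integer division
--     slope = (ep2[1] - ep1[1]) // (ep2[0] - ep1[0])
--     step_size = 1
--     if ep2[0] < ep1[0]:
--         step_size = -1
--     return [
--         (x, ep1[1] + slope * (x - ep1[0]))
--         for x in range(ep1[0], ep2[0] + step_size, step_size)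
--     ]
-- ===== SOURCE B (Python) =====
-- from typing import List, Tuple
--
-- def expand_diagonal_line(
--     ep1: Tuple[int, int], ep2: Tuple[int, int]
-- ) -> List[Tuple[int, int]]:
--     # Incremental walk: maintain (x, y) and add per-step deltas instead of
--     # recomputing y from the closed form at every x.
--     slope = (ep2[1] - ep1[1]) // (ep2[0] - ep1[0])
--     step = 1 if ep1[0] <= ep2[0] else -1
--     dy = slope * step
--     points = []
--     x, y = ep1
--     while x != ep2[0]:
--         points.append((x, y))
--         x += step
--         y += dy
--     points.append((x, y))
--     return points
-- ===== Notes on version B (the rewrite author's own statement) =====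
-- stated objective: alternative
-- what changed: Replaces the closed-form per-point formula y1 + slope*(x-x1) mapped over range() with an incremental line walk that maintains a running (x, y) pair and adds per-step deltas in a while loop.
import Mathlib
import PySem

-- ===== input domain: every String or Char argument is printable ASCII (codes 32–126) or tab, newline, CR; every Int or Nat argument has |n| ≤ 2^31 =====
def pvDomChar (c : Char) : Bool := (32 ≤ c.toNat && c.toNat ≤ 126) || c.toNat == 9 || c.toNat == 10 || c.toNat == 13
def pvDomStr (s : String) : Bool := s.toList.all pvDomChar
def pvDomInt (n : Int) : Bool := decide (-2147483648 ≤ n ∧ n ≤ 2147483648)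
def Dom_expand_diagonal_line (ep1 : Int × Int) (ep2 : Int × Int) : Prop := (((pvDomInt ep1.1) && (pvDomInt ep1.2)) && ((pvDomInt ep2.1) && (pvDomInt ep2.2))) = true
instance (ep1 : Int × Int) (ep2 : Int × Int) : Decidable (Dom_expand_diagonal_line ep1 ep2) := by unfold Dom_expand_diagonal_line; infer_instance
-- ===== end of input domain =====

-- B replaces A's closed-form y = y1 + slope*(x-x1) over range() by an incremental
-- walk maintaining a running (x, y); return values agree wherever A returns.

-- ===== PORT A =====
def expand_diagonal_line (ep1 : Int × Int) (ep2 : Int × Int) : List (Int × Int) :=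
  let slope := PySem.Int.floordiv (ep2.2 - ep1.2) (ep2.1 - ep1.1)
  let step_size : Int := if ep2.1 < ep1.1 then -1 else 1
  (PySem.List.pyRange ep1.1 (ep2.1 + step_size) step_size).map
    (fun x => (x, ep1.2 + slope * (x - ep1.1)))

-- ===== PORT B =====
-- the while loop of Source B: runs (ep2.1 - ep1.1).natAbs times, then one final append
def pvWalk (step dy : Int) : Nat → Int → Int → List (Int × Int)
  | 0, x, y => [(x, y)]
  | n + 1, x, y => (x, y) :: pvWalk step dy n (x + step) (y + dy)

def expand_diagonal_line_alt (ep1 : Int × Int) (ep2 : Int × Int) : List (Int × Int) :=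
  let slope := PySem.Int.floordiv (ep2.2 - ep1.2) (ep2.1 - ep1.1)
  let step : Int := if ep1.1 ≤ ep2.1 then 1 else -1
  pvWalk step (slope * step) (ep2.1 - ep1.1).natAbs ep1.1 ep1.2

-- ===== PRECONDITION & SPEC =====
-- A raises ZeroDivisionError when the endpoints share their x-coordinate; excluded.
def Pre_expand_diagonal_line (ep1 : Int × Int) (ep2 : Int × Int) : Prop := ep1.1 ≠ ep2.1
instance (ep1 : Int × Int) (ep2 : Int × Int) : Decidable (Pre_expand_diagonal_line ep1 ep2) := by
  unfold Pre_expand_diagonal_line; infer_instance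
def pvWitness_expand_diagonal_line : (Int × Int) × (Int × Int) := ((0, 0), (2, 2))

def Spec_expand_diagonal_line (ep1 : Int × Int) (ep2 : Int × Int) (out : List (Int × Int)) : Prop := out = expand_diagonal_line_alt ep1 ep2
instance (ep1 : Int × Int) (ep2 : Int × Int) (out : List (Int × Int)) : Decidable (Spec_expand_diagonal_line ep1 ep2 out) := by unfold Spec_expand_diagonal_line; infer_instance

-- ===== CLAIM (what is proved, stated in full; the proofs are below) =====
def Claim_equal_expand_diagonal_line : Prop := ∀ (ep1 : Int × Int) (ep2 : Int × Int), Dom_expand_diagonal_line ep1 ep2 → Pre_expand_diagonal_line ep1 ep2 → Spec_expand_diagonal_line ep1 ep2 (expand_diagonal_line ep1 ep2)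

-- ===== LEMMAS AND PROOFS =====
theorem pvWalk_eq (s d : Int) : ∀ (n : Nat) (x y : Int),
    pvWalk s d n x y = (List.range (n + 1)).map (fun (k : Nat) => (x + s * (k : Int), y + d * (k : Int))) := by
  intro n
  induction n with
  | zero => intro x y; simp [pvWalk]
  | succ n ih =>
    intro x y
    rw [pvWalk, ih]
    conv_rhs => rw [List.range_succ_eq_map]
    rw [List.map_cons, List.map_map]
    refine List.cons_eq_cons.mpr ⟨by simp, ?_⟩
    apply List.map_congr_left
    intro k _
    simp only [Function.comp_apply, Prod.mk.injEq]
    push_cast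
    constructor <;> ring

theorem expand_diagonal_line_spec : Claim_equal_expand_diagonal_line := by
  intro ep1 ep2 _ hpre
  unfold Spec_expand_diagonal_line expand_diagonal_line expand_diagonal_line_alt
  obtain ⟨x1, y1⟩ := ep1
  obtain ⟨x2, y2⟩ := ep2
  simp only at hpre ⊢
  rcases lt_or_gt_of_ne hpre with h | h
  · -- x1 < x2 : step = 1
    rw [if_neg (by omega : ¬ x2 < x1), if_pos (le_of_lt h)]
    rw [PySem.List.pyRange_one, List.map_map, pvWalk_eq]
    have hn : (x2 + 1 - x1).toNat = (x2 - x1).natAbs + 1 := by omega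
    rw [hn]
    apply List.map_congr_left
    intro k _
    simp only [Function.comp_apply, Prod.mk.injEq]
    constructor <;> ring
  · -- x2 < x1 : step = -1
    rw [if_pos h, if_neg (by omega : ¬ x1 ≤ x2)]
    rw [PySem.List.pyRange_neg_one, List.map_map, pvWalk_eq]
    have hn : (x1 - (x2 + -1)).toNat = (x2 - x1).natAbs + 1 := by omega
    rw [hn]
    apply List.map_congr_left
    intro k _
    simp only [Function.comp_apply, Prod.mk.injEq]
    constructor <;> ring
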